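-- pv_equiv track=rewrite | github.com/fff01/TE- | scripts/clean_tekg2_standardized_jsonl.py | clean_papers
-- ===== SOURCE A (Python) =====
-- def norm(value) -> str:
--     return " ".join(str(value or "").split()).strip()
--
-- def norm_key(value: str) -> str:
--     return norm(value).casefold()
--
-- def clean_papers(items):
--     cleaned = []
--     seen = {}
--     dropped_missing_name = 0
--     duplicates_merged = 0
--
--     for item in items or []:
--         title = norm(item.get("name", ""))
--         if not title:
--             dropped_missing_name += 1
--             continue
--
--         payload = {
--             "name": title,
--             "description": norm(item.get("description", "")),
--         }
--
--         key = norm_key(title)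
--         if key in seen:
--             duplicates_merged += 1
--             existing = cleaned[seen[key]]
--             if not existing.get("description") and payload.get("description"):
--                 existing["description"] = payload["description"]
--             continue
--
--         seen[key] = len(cleaned)
--         cleaned.append(payload)
--
--     return cleaned, dropped_missing_name, duplicates_merged
-- ===== SOURCE B (Python) =====
-- def norm(value) -> str:
--     return " ".join(str(value or "").split()).strip()
--
-- def norm_key(value: str) -> str:
--     return norm(value).casefold()
--
-- def clean_papers(items):
--     # Pass 1: count items with empty normalized titles; bucket the rest by
--     # normalized-key, in first-appearance order.
--     dropped_missing_name = 0
--     groups = {}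
--     for item in items or []:
--         title = norm(item.get("name", ""))
--         if not title:
--             dropped_missing_name += 1
--         else:
--             groups.setdefault(norm_key(title), []).append(
--                 {"name": title, "description": norm(item.get("description", ""))}
--             )
--
--     # Pass 2: reduce each group to one record (first title, first non-empty
--     # description), counting the merged duplicates.
--     cleaned = []
--     duplicates_merged = 0
--     for group in groups.values():
--         description = next(
--             (p["description"] for p in group if p["description"]), "")
--         cleaned.append({"name": group[0]["name"], "description": description})
--         duplicates_merged += len(group) - 1
--
--     return cleaned, dropped_missing_name, duplicates_merged
-- ===== Notes on version B (the rewrite author's own statement) =====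
-- stated objective: alternative
-- what changed: Replaces A's single pass that interleaves dedup bookkeeping (a key-to-index map plus in-place patching of already-emitted records) with a group-then-reduce decomposition: pass 1 buckets kept payloads by normalized key in first-appearance order, pass 2 reduces each bucket to one record (first title, first non-empty description) and counts merged duplicates as len(group)-1.
import Mathlib
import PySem

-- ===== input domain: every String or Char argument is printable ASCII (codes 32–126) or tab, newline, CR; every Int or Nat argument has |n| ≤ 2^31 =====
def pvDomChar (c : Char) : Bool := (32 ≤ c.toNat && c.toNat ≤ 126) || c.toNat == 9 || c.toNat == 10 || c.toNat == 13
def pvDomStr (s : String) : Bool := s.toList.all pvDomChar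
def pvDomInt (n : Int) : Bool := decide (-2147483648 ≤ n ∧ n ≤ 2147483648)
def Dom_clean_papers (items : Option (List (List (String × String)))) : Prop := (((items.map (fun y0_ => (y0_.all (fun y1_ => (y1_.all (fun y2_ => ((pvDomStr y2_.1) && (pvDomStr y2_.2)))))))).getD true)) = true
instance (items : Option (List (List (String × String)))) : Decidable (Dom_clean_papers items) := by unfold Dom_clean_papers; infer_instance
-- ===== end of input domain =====

-- B replaces A's single pass (key→index map + in-place patching of emitted records) by a
-- group-by-key pass followed by a per-group reduce; same results, alternative decomposition.

-- ===== PORT A =====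
-- helpers norm / norm_key shared verbatim by both Pythons.
-- 'str(value or "")' is the identity on the string domain ('' stays ''); casefold = lower on ASCII.
def pvNorm (s : String) : String :=
  PySem.Str.strip (PySem.Str.join " " (PySem.Str.split₀ (if s = "" then "" else s)))

def pvNormKey (s : String) : String := PySem.Str.lower (pvNorm s)

def cleanStepA
    (st : List (List (String × String)) × PySem.Dict String Nat × Int × Int)
    (item : List (String × String)) :
    List (List (String × String)) × PySem.Dict String Nat × Int × Int :=
  match st with
  | (cleaned, seen, dropped, merged) =>
    let title := pvNorm ((PySem.Dict.mk item).getD "name" "")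
    if title = "" then (cleaned, seen, dropped + 1, merged)
    else
      let payload : List (String × String) :=
        [("name", title), ("description", pvNorm ((PySem.Dict.mk item).getD "description" ""))]
      let key := pvNormKey title
      match seen.get? key with
      | some idx =>
          -- cleaned[seen[key]]: seen's values are positions into cleaned, always in range
          let existing := (cleaned[idx]?).getD []
          -- 'not existing.get("description")' ⇔ the stored description is "" (the key is always present)
          let existing' :=
            if (PySem.Dict.mk existing).getD "description" "" = "" ∧
               (PySem.Dict.mk payload).getD "description" "" ≠ "" then
              ((PySem.Dict.mk existing).insert "description"
                ((PySem.Dict.mk payload).getD "description" "")).items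
            else existing
          (cleaned.set idx existing', seen, dropped, merged + 1)
      | none =>
          (cleaned ++ [payload], seen.insert key cleaned.length, dropped, merged)

def clean_papers (items : Option (List (List (String × String)))) :
    (List (List (String × String))) × Int × Int :=
  let r := (items.getD []).foldl cleanStepA ([], PySem.Dict.empty, 0, 0)
  (r.1, r.2.2.1, r.2.2.2)

-- ===== PORT B =====
-- pass 1: bucket kept payloads by normalized key (groups.setdefault(key, []).append(payload))
def cleanStepB
    (st : PySem.Dict String (List (List (String × String))) × Int)
    (item : List (String × String)) :
    PySem.Dict String (List (List (String × String))) × Int :=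
  let title := pvNorm ((PySem.Dict.mk item).getD "name" "")
  if title = "" then (st.1, st.2 + 1)
  else
    (st.1.modify (pvNormKey title) []
      (· ++ [[("name", title),
              ("description", pvNorm ((PySem.Dict.mk item).getD "description" ""))]]),
     st.2)

-- next((p["description"] for p in group if p["description"]), "")
def pvDescOf (g : List (List (String × String))) : String :=
  match g.find? (fun p => (PySem.Dict.mk p).getD "description" "" != "") with
  | some p => (PySem.Dict.mk p).getD "description" ""
  | none => ""

-- {"name": group[0]["name"], "description": description}; groups are never empty
def pvReduceGroup (g : List (List (String × String))) : List (String × String) :=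
  [("name", (PySem.Dict.mk (g.headD [])).getD "name" ""),
   ("description", pvDescOf g)]

def clean_papers_alt (items : Option (List (List (String × String)))) :
    (List (List (String × String))) × Int × Int :=
  let st := (items.getD []).foldl cleanStepB (PySem.Dict.empty, 0)
  let r := st.1.values.foldl
    (fun acc g => (acc.1 ++ [pvReduceGroup g], acc.2 + ((g.length : Int) - 1)))
    ([], (0 : Int))
  (r.1, st.2, r.2)

-- ===== PRECONDITION & SPEC =====
def Spec_clean_papers (items : Option (List (List (String × String)))) (out : (List (List (String × String))) × Int × Int) : Prop := out = clean_papers_alt items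
instance (items : Option (List (List (String × String)))) (out : (List (List (String × String))) × Int × Int) : Decidable (Spec_clean_papers items out) := by unfold Spec_clean_papers; infer_instance

-- ===== CLAIM (what is proved, stated in full; the proofs are below) =====
def Claim_equal_clean_papers : Prop := ∀ (items : Option (List (List (String × String)))), Dom_clean_papers items → Spec_clean_papers items (clean_papers items)

-- ===== LEMMAS AND PROOFS =====

-- abstraction of A's loop state from B's groups dict
def cleanedOf (G : PySem.Dict String (List (List (String × String)))) :
    List (List (String × String)) :=
  G.keys.map (fun k => pvReduceGroup (G.getD k []))

def mergedOf (G : PySem.Dict String (List (List (String × String)))) : Int :=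
  (G.keys.map (fun k => ((G.getD k []).length : Int))).sum - G.keys.length

def stA (G : PySem.Dict String (List (List (String × String)))) (d : Int) :
    List (List (String × String)) × PySem.Dict String Nat × Int × Int :=
  (cleanedOf G, PySem.Dict.mk G.keys.zipIdx, d, mergedOf G)

theorem seen_get?_of_not_mem (K : List String) (k : String) (n : Nat) (h : k ∉ K) :
    (PySem.Dict.mk (K.zipIdx n)).get? k = none := by
  induction K generalizing n with
  | nil => rfl
  | cons a K ih =>
      simp only [List.mem_cons, not_or] at h
      have hne : (a == k) = false := by
        simp only [beq_eq_false_iff_ne]; exact fun hh => h.1 hh.symm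
      simp [List.zipIdx_cons, PySem.Dict.get?_mk_cons, hne, ih (n+1) h.2]

theorem seen_get?_split (P Q : List String) (k : String) (n : Nat) (hP : k ∉ P) :
    (PySem.Dict.mk ((P ++ k :: Q).zipIdx n)).get? k = some (n + P.length) := by
  induction P generalizing n with
  | nil => simp [List.zipIdx_cons, PySem.Dict.get?_mk_cons]
  | cons a P ih =>
      simp only [List.mem_cons, not_or] at hP
      have hne : (a == k) = false := by
        simp only [beq_eq_false_iff_ne]; exact fun hh => hP.1 hh.symm
      rw [List.cons_append, List.zipIdx_cons, PySem.Dict.get?_mk_cons, if_neg (by simp [hne]),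
        ih (n+1) hP.2]
      congr 1
      simp; omega

theorem keys_modify' (G : PySem.Dict String (List (List (String × String))))
    (k : String) (f : List (List (String × String)) → List (List (String × String))) :
    (G.modify k [] f).keys = if k ∈ G.keys then G.keys else G.keys ++ [k] := by
  rw [PySem.Dict.keys_modify]
  by_cases h : k ∈ G.keys
  · rw [if_pos h]
    have hc : G.contains k = true := by
      rw [PySem.Dict.contains_eq_decide_mem_keys]; simpa
    rw [show (G.insert k (f (G.getD k []))).keys
          = ((G.insert k (f (G.getD k []))).items).map Prod.fst from rfl,
        PySem.Dict.items_insert_of_contains _ _ hc, List.map_map]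
    rw [show G.keys = G.items.map Prod.fst from rfl]
    apply List.map_congr_left
    intro p hp
    by_cases hpk : (p.1 == k) = true
    · simp only [Function.comp_apply, hpk]
      exact (eq_of_beq hpk).symm
    · simp only [Function.comp_apply, eq_false_of_ne_true hpk]
      simp
  · rw [if_neg h]
    have hc : G.contains k = false := by
      rw [PySem.Dict.contains_eq_decide_mem_keys]; simpa
    rw [show (G.insert k (f (G.getD k []))).keys
          = ((G.insert k (f (G.getD k []))).items).map Prod.fst from rfl,
        PySem.Dict.items_insert_of_not_contains _ _ hc]
    simp [PySem.Dict.keys]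

theorem dict2_getD (a b : String) :
    (PySem.Dict.mk [("name", a), ("description", b)]).getD "description" "" = b := by
  simp [PySem.Dict.getD, PySem.Dict.get?_mk_cons]

theorem dict2_insert (a b c : String) :
    ((PySem.Dict.mk [("name", a), ("description", b)]).insert "description" c).items
      = [("name", a), ("description", c)] := by
  simp [PySem.Dict.items_insert]

theorem reduce_single (t dp : String) :
    pvReduceGroup [[("name", t), ("description", dp)]] = [("name", t), ("description", dp)] := by
  by_cases h : dp = ""
  · simp [pvReduceGroup, pvDescOf, List.find?, h,
      PySem.Dict.getD, PySem.Dict.get?_mk_cons]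
  · have hb : (dp != "") = true := by simp [h]
    simp [pvReduceGroup, pvDescOf, List.find?, h, hb,
      PySem.Dict.getD, PySem.Dict.get?_mk_cons]

theorem reduce_snoc (g : List (List (String × String))) (hg : g ≠ []) (t dp : String) :
    pvReduceGroup (g ++ [[("name", t), ("description", dp)]])
      = if pvDescOf g = "" ∧ dp ≠ "" then
          [("name", (PySem.Dict.mk (g.headD [])).getD "name" ""), ("description", dp)]
        else pvReduceGroup g := by
  obtain ⟨p0, g', rfl⟩ := List.exists_cons_of_ne_nil hg
  have hhead : ((p0 :: g') ++ [[("name", t), ("description", dp)]]).headD [] = p0 := rfl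
  rcases hfind : (p0 :: g').find? (fun p => (PySem.Dict.mk p).getD "description" "" != "") with _ | q
  · have hd : pvDescOf (p0 :: g') = "" := by simp [pvDescOf, hfind]
    by_cases h : dp = ""
    · have hb : (dp != "") = false := by simp [h]
      rw [if_neg (by rintro ⟨-, h2⟩; exact h2 h)]
      show _ = pvReduceGroup (p0 :: g')
      unfold pvReduceGroup pvDescOf
      rw [List.find?_append, hfind, hhead]
      simp [List.find?, hb, dict2_getD]
    · have hb : (dp != "") = true := by simp [h]
      rw [if_pos ⟨hd, h⟩]
      unfold pvReduceGroup pvDescOf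
      rw [List.find?_append, hfind, hhead]
      simp [List.find?, hb, dict2_getD]
  · have hq : ((PySem.Dict.mk q).getD "description" "" != "") = true := by
      have := List.find?_some hfind
      simpa using this
    have hd : pvDescOf (p0 :: g') = (PySem.Dict.mk q).getD "description" "" := by
      simp [pvDescOf, hfind]
    have hne : ¬ (pvDescOf (p0 :: g') = "" ∧ dp ≠ "") := by
      rw [hd]; rintro ⟨h1, h2⟩; simp [h1] at hq
    rw [if_neg hne]
    unfold pvReduceGroup pvDescOf
    rw [List.find?_append, hfind, hhead]
    simp

theorem set_len_append {α : Type} (l1 : List α) (x y : α) (l2 : List α) :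
    (l1 ++ x :: l2).set l1.length y = l1 ++ y :: l2 := by
  simp

theorem pass2_eq (gs : List (List (List (String × String))))
    (acc : List (List (String × String))) (m : Int) :
    gs.foldl (fun acc g => (acc.1 ++ [pvReduceGroup g], acc.2 + ((g.length : Int) - 1))) (acc, m)
      = (acc ++ gs.map pvReduceGroup,
         m + (gs.map (fun g => ((g.length : Int)))).sum - gs.length) := by
  induction gs generalizing acc m with
  | nil => simp
  | cons g gs ih => simp [ih]; ring

set_option maxHeartbeats 1000000 in
theorem cons_step (G : PySem.Dict String (List (List (String × String)))) (d : Int)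
    (x : List (String × String))
    (h1 : G.keys.Nodup) (h2 : ∀ k ∈ G.keys, G.getD k [] ≠ []) :
    cleanStepA (stA G d) x = stA (cleanStepB (G, d) x).1 (cleanStepB (G, d) x).2
      ∧ (cleanStepB (G, d) x).1.keys.Nodup
      ∧ ∀ k ∈ (cleanStepB (G, d) x).1.keys, (cleanStepB (G, d) x).1.getD k [] ≠ [] := by
  simp only [cleanStepA, cleanStepB, stA]
  by_cases ht : pvNorm ((PySem.Dict.mk x).getD "name" "") = ""
  · simp [ht]
    exact ⟨h1, h2⟩
  · simp only [ht, if_false]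
    set t := pvNorm ((PySem.Dict.mk x).getD "name" "") with ht_def
    set dp := pvNorm ((PySem.Dict.mk x).getD "description" "") with hdp_def
    set k := pvNormKey t with hk_def
    by_cases hk2 : k ∈ G.keys
    · -- existing key: A patches cleaned[seen[k]], B appends to the bucket
      obtain ⟨P, Q, hK⟩ := List.append_of_mem hk2
      have h1' : (P ++ k :: Q).Nodup := hK ▸ h1
      have hkP : k ∉ P := fun hp =>
        (List.disjoint_of_nodup_append h1') hp (List.mem_cons_self)
      have hkQ : k ∉ Q := (List.nodup_cons.mp (List.Nodup.of_append_right h1')).1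
      have hget : (PySem.Dict.mk G.keys.zipIdx).get? k = some P.length := by
        rw [hK]; simpa using seen_get?_split P Q k 0 hkP
      rw [hget]
      dsimp only
      have hgne := h2 k hk2
      have hf : cleanedOf G = P.map (fun k' => pvReduceGroup (G.getD k' []))
          ++ pvReduceGroup (G.getD k []) :: Q.map (fun k' => pvReduceGroup (G.getD k' [])) := by
        unfold cleanedOf; rw [hK]; simp
      have hexist : (cleanedOf G)[P.length]?.getD ([] : List (String × String))
          = pvReduceGroup (G.getD k []) := by
        rw [hf, List.getElem?_append_right (by simp)]
        simp
      rw [hexist]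
      have hred : pvReduceGroup (G.getD k [])
          = [("name", (PySem.Dict.mk ((G.getD k []).headD [])).getD "name" ""),
             ("description", pvDescOf (G.getD k []))] := rfl
      rw [hred, dict2_getD, dict2_getD, dict2_insert]
      have hkeys' : (G.modify k [] fun y => y ++ [[("name", t), ("description", dp)]]).keys
          = G.keys := by rw [keys_modify', if_pos hk2]
      have hgd : ∀ k', (G.modify k [] fun y => y ++ [[("name", t), ("description", dp)]]).getD k' []
          = if k' = k then G.getD k [] ++ [[("name", t), ("description", dp)]]
            else G.getD k' [] := fun k' => PySem.Dict.getD_modify G k k' [] _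
      refine ⟨?_, ?_, ?_⟩
      · simp only [Prod.mk.injEq]
        refine ⟨?_, by rw [hkeys'], trivial, ?_⟩
        · -- cleaned component
          rw [← hred, hf,
            show P.length = (P.map (fun k' => pvReduceGroup (G.getD k' []))).length by simp,
            set_len_append]
          unfold cleanedOf
          rw [hkeys', hK, List.map_append, List.map_cons]
          congr 1
          · apply List.map_congr_left
            intro k' hk'
            rw [hgd k', if_neg (by rintro rfl; exact hkP hk')]
          congr 1
          · rw [hgd k, if_pos rfl, reduce_snoc _ hgne t dp, hred]
          · apply List.map_congr_left
            intro k' hk'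
            rw [hgd k', if_neg (by rintro rfl; exact hkQ hk')]
        · -- merged component
          unfold mergedOf
          rw [hkeys', hK]
          have hPm : P.map (fun k' => (((G.modify k [] fun y =>
                y ++ [[("name", t), ("description", dp)]]).getD k' []).length : Int))
              = P.map (fun k' => (((G.getD k' []).length : Int))) := by
            apply List.map_congr_left
            intro k' hk'
            rw [hgd k', if_neg (by rintro rfl; exact hkP hk')]
          have hQm : Q.map (fun k' => (((G.modify k [] fun y =>
                y ++ [[("name", t), ("description", dp)]]).getD k' []).length : Int))
              = Q.map (fun k' => (((G.getD k' []).length : Int))) := by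
            apply List.map_congr_left
            intro k' hk'
            rw [hgd k', if_neg (by rintro rfl; exact hkQ hk')]
          have hgk : (G.modify k [] fun y => y ++ [[("name", t), ("description", dp)]]).getD k []
              = G.getD k [] ++ [[("name", t), ("description", dp)]] := by
            rw [hgd k, if_pos rfl]
          simp only [List.map_append, List.map_cons, List.sum_append, List.sum_cons, hPm, hQm,
            hgk, List.length_append, List.length_cons, List.length_nil]
          push_cast
          ring
      · rw [hkeys']; exact h1
      · intro k' hk'
        rw [hkeys'] at hk'
        rw [hgd k']
        by_cases hkk : k' = k
        · simp [hkk]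
        · rw [if_neg hkk]; exact h2 k' hk'
    · -- new key: A appends a record and records its index, B opens a new bucket
      rw [seen_get?_of_not_mem G.keys k 0 hk2]
      dsimp only
      have hkeys' : (G.modify k [] fun y => y ++ [[("name", t), ("description", dp)]]).keys
          = G.keys ++ [k] := by rw [keys_modify', if_neg hk2]
      have hgd : ∀ k', (G.modify k [] fun y => y ++ [[("name", t), ("description", dp)]]).getD k' []
          = if k' = k then [[("name", t), ("description", dp)]]
            else G.getD k' [] := by
        intro k'
        have h0 : G.getD k [] = [] := by
          have := (PySem.Dict.get?_eq_none_iff_not_mem_keys G k).mpr hk2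
          simp [PySem.Dict.getD, this]
        rw [PySem.Dict.getD_modify G k k' [] _, h0]
        simp
      refine ⟨?_, ?_, ?_⟩
      · simp only [Prod.mk.injEq]
        refine ⟨?_, ?_, trivial, ?_⟩
        · -- cleaned component
          have hA : G.keys.map (fun k' => pvReduceGroup
                ((G.modify k [] fun y => y ++ [[("name", t), ("description", dp)]]).getD k' []))
              = G.keys.map (fun k' => pvReduceGroup (G.getD k' [])) :=
            List.map_congr_left (fun k' hk' => by
              rw [hgd k', if_neg (by rintro rfl; exact hk2 hk')])
          have hB : pvReduceGroup
                ((G.modify k [] fun y => y ++ [[("name", t), ("description", dp)]]).getD k [])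
              = [("name", t), ("description", dp)] := by
            rw [hgd k, if_pos rfl, reduce_single]
          unfold cleanedOf
          rw [hkeys', List.map_append, List.map_cons, List.map_nil, hA, hB]
        · -- seen component
          apply PySem.Dict.ext
          have hcont : (PySem.Dict.mk G.keys.zipIdx).contains k = false := by
            rw [PySem.Dict.contains_eq_decide_mem_keys]
            have hkk : (PySem.Dict.mk G.keys.zipIdx).keys = G.keys := by
              simp [PySem.Dict.keys]
            rw [hkk]
            simpa using hk2
          rw [PySem.Dict.items_insert_of_not_contains _ _ hcont, hkeys', List.zipIdx_append]
          simp only [List.zipIdx_cons, List.zipIdx_nil, cleanedOf, List.length_map, Nat.zero_add]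
        · -- merged component
          unfold mergedOf
          rw [hkeys']
          have hPm : G.keys.map (fun k' => (((G.modify k [] fun y =>
                y ++ [[("name", t), ("description", dp)]]).getD k' []).length : Int))
              = G.keys.map (fun k' => (((G.getD k' []).length : Int))) := by
            apply List.map_congr_left
            intro k' hk'
            rw [hgd k', if_neg (by rintro rfl; exact hk2 hk')]
          have hgk : (G.modify k [] fun y => y ++ [[("name", t), ("description", dp)]]).getD k []
              = [[("name", t), ("description", dp)]] := by
            rw [hgd k, if_pos rfl]
          simp only [List.map_append, List.map_cons, List.map_nil, List.sum_append,
            List.sum_cons, List.sum_nil, hPm, hgk, List.length_append, List.length_cons,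
            List.length_nil]
          push_cast
          ring
      · rw [hkeys']
        refine List.Nodup.append h1 (List.nodup_singleton k) ?_
        intro a ha hb
        rw [List.mem_singleton] at hb
        exact hk2 (hb ▸ ha)
      · intro k' hk'
        rw [hgd k']
        by_cases hkk : k' = k
        · simp [hkk]
        · rw [if_neg hkk]
          rw [hkeys'] at hk'
          rcases List.mem_append.mp hk' with h | h
          · exact h2 k' h
          · simp at h; exact absurd h hkk


theorem loop_eq (l : List (List (String × String)))
    (G : PySem.Dict String (List (List (String × String)))) (d : Int)
    (h1 : G.keys.Nodup) (h2 : ∀ k ∈ G.keys, G.getD k [] ≠ []) :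
    l.foldl cleanStepA (stA G d)
        = stA (l.foldl cleanStepB (G, d)).1 (l.foldl cleanStepB (G, d)).2
      ∧ (l.foldl cleanStepB (G, d)).1.keys.Nodup
      ∧ ∀ k ∈ (l.foldl cleanStepB (G, d)).1.keys,
          (l.foldl cleanStepB (G, d)).1.getD k [] ≠ [] := by
  induction l generalizing G d with
  | nil => exact ⟨rfl, h1, h2⟩
  | cons x l ih =>
      obtain ⟨hstep, hnod, hne⟩ := cons_step G d x h1 h2
      obtain ⟨ih1, ih2, ih3⟩ := ih (cleanStepB (G, d) x).1 (cleanStepB (G, d) x).2 hnod hne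
      simp only [Prod.mk.eta] at ih1 ih2 ih3
      simp only [List.foldl_cons]
      exact ⟨by rw [hstep]; exact ih1, ih2, ih3⟩

theorem alt_pass2 (G : PySem.Dict String (List (List (String × String))))
    (hnod : G.keys.Nodup) :
    G.values.foldl
        (fun acc g => (acc.1 ++ [pvReduceGroup g], acc.2 + ((g.length : Int) - 1)))
        ([], (0 : Int))
      = (cleanedOf G, mergedOf G) := by
  rw [PySem.Dict.values_eq_map_keys G hnod ([] : List (List (String × String))), pass2_eq]
  simp only [Prod.mk.injEq]
  constructor
  · simp [cleanedOf, List.map_map, Function.comp]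
  · simp only [mergedOf, List.map_map, List.length_map, Function.comp_def]
    ring

theorem main_eq (items : Option (List (List (String × String)))) :
    clean_papers items = clean_papers_alt items := by
  obtain ⟨heq, hnod, hne⟩ := loop_eq (items.getD []) PySem.Dict.empty 0
    (by simp [PySem.Dict.keys_empty]) (by simp [PySem.Dict.keys_empty])
  show (((items.getD []).foldl cleanStepA ([], PySem.Dict.empty, 0, 0)).1,
        ((items.getD []).foldl cleanStepA ([], PySem.Dict.empty, 0, 0)).2.2.1,
        ((items.getD []).foldl cleanStepA ([], PySem.Dict.empty, 0, 0)).2.2.2)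
      = ((((items.getD []).foldl cleanStepB (PySem.Dict.empty, 0)).1.values.foldl
            (fun acc g => (acc.1 ++ [pvReduceGroup g], acc.2 + ((g.length : Int) - 1)))
            ([], (0 : Int))).1,
         ((items.getD []).foldl cleanStepB (PySem.Dict.empty, 0)).2,
         (((items.getD []).foldl cleanStepB (PySem.Dict.empty, 0)).1.values.foldl
            (fun acc g => (acc.1 ++ [pvReduceGroup g], acc.2 + ((g.length : Int) - 1)))
            ([], (0 : Int))).2)
  rw [show (([], PySem.Dict.empty, 0, 0) :
        List (List (String × String)) × PySem.Dict String Nat × Int × Int)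
      = stA PySem.Dict.empty 0 from rfl, heq, alt_pass2 _ hnod]
  rfl

-- ===== VERDICT (by name: the statement is the Claim_ definition above) =====
theorem clean_papers_spec : Claim_equal_clean_papers := by
  intro items _
  exact main_eq items
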